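-- pv_equiv track=rewrite | github.com/AdamHJones/noni | backend/app/services/vision_service.py | _extract_medication_data
-- ===== SOURCE A (Python) =====
-- from typing import Dict, List, Optional
--
-- def _extract_medication_data(text: str) -> Optional[Dict]:
--     """Extract structured medication data from analysis"""
--     # This is a simple extraction - Claude's response is already pretty structured
--     # In production, you might use more sophisticated parsing
--
--     data = {}
--
--     # Look for common patterns
--     patterns = {
--         "name": ["medication name", "drug name", "what it is"],
--         "dosage": ["dosage", "dose", "strength"],
--         "frequency": ["frequency", "how often", "take"],
--         "instructions": ["instructions", "how to take"],
--     }
--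
--     lines = text.lower().split("\n")
--     for key, keywords in patterns.items():
--         for line in lines:
--             if any(kw in line for kw in keywords):
--                 # Extract value after colon if present
--                 if ":" in line:
--                     value = line.split(":", 1)[1].strip()
--                     data[key] = value
--                     break
--
--     return data if data else None
-- ===== SOURCE B (Python) =====
-- from typing import Dict, List, Optional
--
--
-- def _extract_medication_data(text: str) -> Optional[Dict]:
--     """Single pass over the lines, tracking each field in its own variable."""
--     name = dosage = frequency = instructions = None
--     for line in text.lower().split("\n"):
--         if ":" not in line:
--             continue
--         value = line.split(":", 1)[1].strip()
--         if name is None and any(kw in line for kw in ("medication name", "drug name", "what it is")):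
--             name = value
--         if dosage is None and any(kw in line for kw in ("dosage", "dose", "strength")):
--             dosage = value
--         if frequency is None and any(kw in line for kw in ("frequency", "how often", "take")):
--             frequency = value
--         if instructions is None and any(kw in line for kw in ("instructions", "how to take")):
--             instructions = value
--     data = {}
--     if name is not None:
--         data["name"] = name
--     if dosage is not None:
--         data["dosage"] = dosage
--     if frequency is not None:
--         data["frequency"] = frequency
--     if instructions is not None:
--         data["instructions"] = instructions
--     return data or None
-- ===== Notes on version B (the rewrite author's own statement) =====
-- stated objective: alternative
-- what changed: B makes one pass over the lines holding each of the four fields in its own Optional variable (first-assignment-wins), instead of A's per-key re-scan of all lines, then assembles the dict from the four variables in declaration order.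
import Mathlib
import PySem

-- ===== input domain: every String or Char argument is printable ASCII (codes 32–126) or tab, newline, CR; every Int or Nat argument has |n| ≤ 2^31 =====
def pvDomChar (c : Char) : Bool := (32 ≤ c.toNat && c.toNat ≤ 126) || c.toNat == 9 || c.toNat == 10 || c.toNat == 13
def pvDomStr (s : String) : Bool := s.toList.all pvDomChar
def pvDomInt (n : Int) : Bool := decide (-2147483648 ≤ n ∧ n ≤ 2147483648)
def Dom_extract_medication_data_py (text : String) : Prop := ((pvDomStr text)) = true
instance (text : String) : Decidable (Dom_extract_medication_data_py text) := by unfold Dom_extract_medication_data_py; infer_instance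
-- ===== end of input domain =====

-- B replaces A's per-key re-scan of all lines by a single pass holding each field in its own Option variable (objective: alternative decomposition).

-- ===== PORT A =====
def patternsA : List (String × List String) :=
  [("name", ["medication name", "drug name", "what it is"]),
   ("dosage", ["dosage", "dose", "strength"]),
   ("frequency", ["frequency", "how often", "take"]),
   ("instructions", ["instructions", "how to take"])]

-- line.split(":", 1)[1].strip(); under the ":" in line guard the [1] index always exists (getD "" is unreachable)
def valA (line : String) : String :=
  PySem.Str.strip (((PySem.Str.splitMax? line ":" 1).getD []).getD 1 "")

-- any(kw in line for kw in keywords)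
def matchA (kws : List String) (line : String) : Bool :=
  kws.any (fun kw => PySem.Str.isIn kw line)

-- the inner 'for line in lines: … break' loop for one key
def findA (kws : List String) : List String → Option String
  | [] => none
  | l :: ls =>
    if matchA kws l then
      if PySem.Str.isIn ":" l then some (valA l) else findA kws ls
    else findA kws ls

def extract_medication_data_py (text : String) : Option (List (String × String)) :=
  let lines := (PySem.Str.split? (PySem.Str.lower text) "\n").getD []
  let data := patternsA.foldl (fun d p =>
    match findA p.2 lines with
    | some v => d ++ [(p.1, v)]
    | none => d) []
  if data.isEmpty then none else some data

-- ===== PORT B =====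
-- the four local variables name/dosage/frequency/instructions of the Python loop
structure BFields where
  name : Option String
  dosage : Option String
  frequency : Option String
  instructions : Option String
deriving DecidableEq, Repr

def bNameKws : List String := ["medication name", "drug name", "what it is"]
def bDosKws : List String := ["dosage", "dose", "strength"]
def bFreqKws : List String := ["frequency", "how often", "take"]
def bInstrKws : List String := ["instructions", "how to take"]

def bMatch (kws : List String) (line : String) : Bool :=
  kws.any (fun kw => PySem.Str.isIn kw line)

-- 'if field is None and any(kw in line …): field = value'
def bAssign (f : Option String) (kws : List String) (line v : String) : Option String :=
  if f.isNone && bMatch kws line then some v else f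

-- line.split(":", 1)[1].strip(); only reached under the ":" in line guard, so [1] exists
def bVal (line : String) : String :=
  PySem.Str.strip (((PySem.Str.splitMax? line ":" 1).getD []).getD 1 "")

-- the single pass over the lines
def bLoop : List String → BFields → BFields
  | [], st => st
  | l :: ls, st =>
    if PySem.Str.isIn ":" l then
      let v := bVal l
      bLoop ls { name := bAssign st.name bNameKws l v,
                 dosage := bAssign st.dosage bDosKws l v,
                 frequency := bAssign st.frequency bFreqKws l v,
                 instructions := bAssign st.instructions bInstrKws l v }
    else bLoop ls st

def extract_medication_data_py_alt (text : String) : Option (List (String × String)) :=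
  let st := bLoop ((PySem.Str.split? (PySem.Str.lower text) "\n").getD []) ⟨none, none, none, none⟩
  let data :=
    (match st.name with | some v => [("name", v)] | none => []) ++
    (match st.dosage with | some v => [("dosage", v)] | none => []) ++
    (match st.frequency with | some v => [("frequency", v)] | none => []) ++
    (match st.instructions with | some v => [("instructions", v)] | none => [])
  if data.isEmpty then none else some data

-- ===== PRECONDITION & SPEC =====
def Spec_extract_medication_data_py (text : String) (out : Option (List (String × String))) : Prop := out = extract_medication_data_py_alt text
instance (text : String) (out : Option (List (String × String))) : Decidable (Spec_extract_medication_data_py text out) := by unfold Spec_extract_medication_data_py; infer_instance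

-- ===== CLAIM =====
def Claim_equal_extract_medication_data_py : Prop := ∀ (text : String), Dom_extract_medication_data_py text → Spec_extract_medication_data_py text (extract_medication_data_py text)

-- ===== LEMMAS AND PROOFS =====

theorem bLoop_name : ∀ (ls : List String) (st : BFields),
    (bLoop ls st).name = st.name.or (findA bNameKws ls) := by
  intro ls
  induction ls with
  | nil => intro st; simp [bLoop, findA]
  | cons l ls ih =>
    intro st
    by_cases hc : PySem.Str.isIn ":" l = true
    · have hc2 : PySem.Chars.isIn [':'] l.toList = true := by simpa using hc
      by_cases hm : matchA bNameKws l = true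
      · have hm' : bMatch bNameKws l = true := hm
        simp only [bLoop, hc, if_true, ih, bAssign, hm', Bool.and_true]
        cases h : st.name <;> simp [h, findA, hm, hc2, valA, bVal]
      · have hm' : bMatch bNameKws l = false := by simpa using hm
        simp only [bLoop, hc, if_true, ih, bAssign, hm', Bool.and_false, Bool.false_eq_true,
          if_false]
        simp [findA, (show matchA bNameKws l = false by simpa using hm)]
    · have hc' : PySem.Str.isIn ":" l = false := by simpa using hc
      have hc2 : PySem.Chars.isIn [':'] l.toList = false := by simpa using hc'
      simp only [bLoop, hc', Bool.false_eq_true, if_false, ih]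
      by_cases hm : matchA bNameKws l = true <;> simp [findA, hm, hc2]

theorem bLoop_dosage : ∀ (ls : List String) (st : BFields),
    (bLoop ls st).dosage = st.dosage.or (findA bDosKws ls) := by
  intro ls
  induction ls with
  | nil => intro st; simp [bLoop, findA]
  | cons l ls ih =>
    intro st
    by_cases hc : PySem.Str.isIn ":" l = true
    · have hc2 : PySem.Chars.isIn [':'] l.toList = true := by simpa using hc
      by_cases hm : matchA bDosKws l = true
      · have hm' : bMatch bDosKws l = true := hm
        simp only [bLoop, hc, if_true, ih, bAssign, hm', Bool.and_true]
        cases h : st.dosage <;> simp [h, findA, hm, hc2, valA, bVal]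
      · have hm' : bMatch bDosKws l = false := by simpa using hm
        simp only [bLoop, hc, if_true, ih, bAssign, hm', Bool.and_false, Bool.false_eq_true,
          if_false]
        simp [findA, (show matchA bDosKws l = false by simpa using hm)]
    · have hc' : PySem.Str.isIn ":" l = false := by simpa using hc
      have hc2 : PySem.Chars.isIn [':'] l.toList = false := by simpa using hc'
      simp only [bLoop, hc', Bool.false_eq_true, if_false, ih]
      by_cases hm : matchA bDosKws l = true <;> simp [findA, hm, hc2]

theorem bLoop_frequency : ∀ (ls : List String) (st : BFields),
    (bLoop ls st).frequency = st.frequency.or (findA bFreqKws ls) := by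
  intro ls
  induction ls with
  | nil => intro st; simp [bLoop, findA]
  | cons l ls ih =>
    intro st
    by_cases hc : PySem.Str.isIn ":" l = true
    · have hc2 : PySem.Chars.isIn [':'] l.toList = true := by simpa using hc
      by_cases hm : matchA bFreqKws l = true
      · have hm' : bMatch bFreqKws l = true := hm
        simp only [bLoop, hc, if_true, ih, bAssign, hm', Bool.and_true]
        cases h : st.frequency <;> simp [h, findA, hm, hc2, valA, bVal]
      · have hm' : bMatch bFreqKws l = false := by simpa using hm
        simp only [bLoop, hc, if_true, ih, bAssign, hm', Bool.and_false, Bool.false_eq_true,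
          if_false]
        simp [findA, (show matchA bFreqKws l = false by simpa using hm)]
    · have hc' : PySem.Str.isIn ":" l = false := by simpa using hc
      have hc2 : PySem.Chars.isIn [':'] l.toList = false := by simpa using hc'
      simp only [bLoop, hc', Bool.false_eq_true, if_false, ih]
      by_cases hm : matchA bFreqKws l = true <;> simp [findA, hm, hc2]

theorem bLoop_instructions : ∀ (ls : List String) (st : BFields),
    (bLoop ls st).instructions = st.instructions.or (findA bInstrKws ls) := by
  intro ls
  induction ls with
  | nil => intro st; simp [bLoop, findA]
  | cons l ls ih =>
    intro st
    by_cases hc : PySem.Str.isIn ":" l = true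
    · have hc2 : PySem.Chars.isIn [':'] l.toList = true := by simpa using hc
      by_cases hm : matchA bInstrKws l = true
      · have hm' : bMatch bInstrKws l = true := hm
        simp only [bLoop, hc, if_true, ih, bAssign, hm', Bool.and_true]
        cases h : st.instructions <;> simp [h, findA, hm, hc2, valA, bVal]
      · have hm' : bMatch bInstrKws l = false := by simpa using hm
        simp only [bLoop, hc, if_true, ih, bAssign, hm', Bool.and_false, Bool.false_eq_true,
          if_false]
        simp [findA, (show matchA bInstrKws l = false by simpa using hm)]
    · have hc' : PySem.Str.isIn ":" l = false := by simpa using hc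
      have hc2 : PySem.Chars.isIn [':'] l.toList = false := by simpa using hc'
      simp only [bLoop, hc', Bool.false_eq_true, if_false, ih]
      by_cases hm : matchA bInstrKws l = true <;> simp [findA, hm, hc2]

-- ===== VERDICT =====
theorem extract_medication_data_py_spec : Claim_equal_extract_medication_data_py := by
  intro text _
  unfold Spec_extract_medication_data_py extract_medication_data_py extract_medication_data_py_alt
  dsimp only
  generalize (PySem.Str.split? (PySem.Str.lower text) "\n").getD [] = lns
  rw [bLoop_name, bLoop_dosage, bLoop_frequency, bLoop_instructions]
  simp only [Option.none_or, patternsA, List.foldl_cons, List.foldl_nil]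
  rw [show bNameKws = ["medication name", "drug name", "what it is"] from rfl,
      show bDosKws = ["dosage", "dose", "strength"] from rfl,
      show bFreqKws = ["frequency", "how often", "take"] from rfl,
      show bInstrKws = ["instructions", "how to take"] from rfl]
  generalize findA ["medication name", "drug name", "what it is"] lns = o1
  generalize findA ["dosage", "dose", "strength"] lns = o2
  generalize findA ["frequency", "how often", "take"] lns = o3
  generalize findA ["instructions", "how to take"] lns = o4
  cases o1 <;> cases o2 <;> cases o3 <;> cases o4 <;> rfl
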